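-- pv_equiv track=rewrite | github.com/sadanandv/CS5001EvolutionaryComputing | Unit 1/Pipeline.py | branch_and_bound_with_extended_list_heuristic
-- ===== SOURCE A (Python) =====
-- from typing import List, Tuple, Dict
-- from heapq import heappush, heappop
--
-- def branch_and_bound_with_extended_list_heuristic(graph: Dict[str, List[str]], start: str, goal: str, heuristic: Dict[str, int]) -> List[str]:
--     pq = [(heuristic[start], [start])]
--     visited = set()
--
--     while pq:
--         cost, current_path = heappop(pq)
--         current_node = current_path[-1]
--
--         if current_node == goal:
--             return current_path
--
--         if current_node in visited:
--             continue
--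
--         visited.add(current_node)
--
--         for neighbor in graph.get(current_node, []):
--             new_path = current_path + [neighbor]
--             new_cost = cost + heuristic.get(neighbor, 0)
--             heappush(pq, (new_cost, new_path))
--
--     return None
-- ===== SOURCE B (Python) =====
-- def branch_and_bound_with_extended_list_heuristic(graph, start, goal, heuristic):
--     frontier = [(heuristic[start], [start])]
--     visited = set()
--
--     while frontier:
--         best = min(frontier)
--         frontier.remove(best)
--         cost, current_path = best
--         current_node = current_path[-1]
--
--         if current_node == goal:
--             return current_path
--
--         if current_node in visited:
--             continue
--
--         visited.add(current_node)
--
--         for neighbor in graph.get(current_node, []):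
--             frontier.append((cost + heuristic.get(neighbor, 0), current_path + [neighbor]))
--
--     return None
-- ===== Notes on version B (the rewrite author's own statement) =====
-- stated objective: simpler
-- what changed: Replaces the binary heap priority queue (heapq heappush/heappop) with a plain list from which each iteration selects and removes the minimum (cost, path) tuple via min(); the search loop, visited set, goal test and expansion are unchanged.
import Mathlib
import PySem

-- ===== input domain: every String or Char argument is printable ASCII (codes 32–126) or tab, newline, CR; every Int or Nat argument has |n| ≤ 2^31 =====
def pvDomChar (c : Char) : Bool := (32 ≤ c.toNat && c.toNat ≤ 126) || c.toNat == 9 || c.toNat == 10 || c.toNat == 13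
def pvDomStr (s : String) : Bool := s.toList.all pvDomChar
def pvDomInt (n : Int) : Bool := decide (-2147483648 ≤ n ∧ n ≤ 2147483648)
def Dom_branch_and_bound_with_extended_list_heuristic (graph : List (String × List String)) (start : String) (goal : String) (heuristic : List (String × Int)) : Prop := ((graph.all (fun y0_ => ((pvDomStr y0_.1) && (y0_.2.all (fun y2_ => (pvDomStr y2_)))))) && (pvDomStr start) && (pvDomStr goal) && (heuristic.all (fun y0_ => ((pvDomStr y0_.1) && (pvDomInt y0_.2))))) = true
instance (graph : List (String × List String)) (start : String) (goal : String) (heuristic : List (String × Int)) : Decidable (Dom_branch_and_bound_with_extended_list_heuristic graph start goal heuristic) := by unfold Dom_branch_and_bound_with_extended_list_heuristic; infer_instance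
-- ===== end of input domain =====

-- B replaces A's heapq binary-heap priority queue by a plain list scanned with min();
-- objective: simpler (no asymptotic speedup — each pop is a linear scan instead of O(log n)).

-- ===== PORT A =====
-- Queue entries are Python tuples (cost, path).  Python's tuple `<` compares the costs,
-- then the paths lexicographically (strings by code point) — pvLt is exactly that.
def pvLexLt : List String → List String → Bool
  | [], [] => false
  | [], _ :: _ => true
  | _ :: _, [] => false
  | a :: as, b :: bs => decide (a < b) || (a == b && pvLexLt as bs)

def pvLt (x y : Int × List String) : Bool :=
  decide (x.1 < y.1) || (x.1 == y.1 && pvLexLt x.2 y.2)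

-- default used for in-range list reads (all reads below are provably in range)
def pvD0 : Int × List String := (0, [])

-- dict lookup: d.get(k, dflt) / d[k] on an insertion-ordered assoc list (first match)
def pvGet {α : Type} (d : List (String × α)) (k : String) (dflt : α) : α :=
  ((d.find? (fun p => p.1 == k)).map (·.2)).getD dflt

-- CPython heapq._siftdown(heap, startpos, pos): bubble newitem up while it is < parent
def pvSiftdownLoop (heap : List (Int × List String)) (startpos pos : Nat)
    (newitem : Int × List String) : List (Int × List String) :=
  if _h : startpos < pos then
    let parentpos := (pos - 1) / 2
    let parent := heap.getD parentpos pvD0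
    if pvLt newitem parent then pvSiftdownLoop (heap.set pos parent) startpos parentpos newitem
    else heap.set pos newitem
  else heap.set pos newitem
termination_by pos
decreasing_by omega

def pvSiftdown (heap : List (Int × List String)) (startpos pos : Nat) : List (Int × List String) :=
  pvSiftdownLoop heap startpos pos (heap.getD pos pvD0)

-- CPython heapq._siftup(heap, pos): move the hole down along smaller children, then sift up
def pvSiftupLoop (heap : List (Int × List String)) (startpos pos : Nat)
    (newitem : Int × List String) : List (Int × List String) :=
  let childpos := 2 * pos + 1
  if _h : childpos < heap.length then
    let childpos :=
      if childpos + 1 < heap.length &&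
         !(pvLt (heap.getD childpos pvD0) (heap.getD (childpos + 1) pvD0))
      then childpos + 1 else childpos
    pvSiftupLoop (heap.set pos (heap.getD childpos pvD0)) startpos childpos newitem
  else pvSiftdown (heap.set pos newitem) startpos pos
termination_by heap.length - pos
decreasing_by simp only [List.length_set]; split <;> omega

def pvSiftup (heap : List (Int × List String)) (pos : Nat) : List (Int × List String) :=
  pvSiftupLoop heap pos pos (heap.getD pos pvD0)

-- heapq.heappush: append, then sift the new last element up
def pvHeappush (heap : List (Int × List String)) (item : Int × List String) :
    List (Int × List String) :=
  pvSiftdown (heap ++ [item]) 0 heap.length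

-- heapq.heappop: pop the last element, move it to the root, sift down (called on nonempty heaps only)
def pvHeappop (heap : List (Int × List String)) :
    (Int × List String) × List (Int × List String) :=
  let lastelt := heap.getLast?.getD pvD0
  let rest := heap.dropLast
  if rest.isEmpty then (lastelt, [])
  else (rest.getD 0 pvD0, pvSiftup (rest.set 0 lastelt) 0)

-- fuel: each loop iteration pops one entry; at most 1 + Σ |adjacency list| entries are ever
-- pushed, so this bound is never reached (it only makes the recursion structural)
def pvFuel (graph : List (String × List String)) : Nat :=
  (graph.map (fun p => p.2.length)).sum + graph.length + 1

def pvLoopA (graph : List (String × List String)) (goal : String)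
    (heuristic : List (String × Int)) (fuel : Nat)
    (pq : List (Int × List String)) (visited : PySem.Set String) : Option (List String) :=
  match fuel with
  | 0 => none
  | fuel + 1 =>
    match pq with
    | [] => none
    | _ :: _ =>
      let popped := pvHeappop pq
      let cost := popped.1.1
      let path := popped.1.2
      let pq' := popped.2
      let current := PySem.List.pyGetD path (-1) ""     -- current_path[-1]
      if current == goal then some path
      else if PySem.Set.contains visited current then pvLoopA graph goal heuristic fuel pq' visited
      else
        let visited' := PySem.Set.add visited current
        let pq'' := (pvGet graph current []).foldl
          (fun q nb => pvHeappush q (cost + pvGet heuristic nb 0, path ++ [nb])) pq'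
        pvLoopA graph goal heuristic fuel pq'' visited'

def branch_and_bound_with_extended_list_heuristic (graph : List (String × List String))
    (start : String) (goal : String) (heuristic : List (String × Int)) : Option (List String) :=
  pvLoopA graph goal heuristic (pvFuel graph) [(pvGet heuristic start 0, [start])] PySem.Set.empty

-- ===== PORT B =====
-- min(frontier): first minimal (cost, path) tuple under Python's tuple order
def pvMin (frontier : List (Int × List String)) : Int × List String :=
  match frontier with
  | [] => pvD0          -- Python min raises on empty; only called on nonempty frontiers
  | x :: t => t.foldl (fun best y => if pvLt y best then y else best) x

def pvLoopB (graph : List (String × List String)) (goal : String)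
    (heuristic : List (String × Int)) (fuel : Nat)
    (frontier : List (Int × List String)) (visited : PySem.Set String) : Option (List String) :=
  match fuel with
  | 0 => none
  | fuel + 1 =>
    match frontier with
    | [] => none
    | _ :: _ =>
      let best := pvMin frontier
      let frontier' := (PySem.List.remove? frontier best).getD frontier   -- frontier.remove(best)
      let cost := best.1
      let path := best.2
      let current := PySem.List.pyGetD path (-1) ""     -- current_path[-1]
      if current == goal then some path
      else if PySem.Set.contains visited current then pvLoopB graph goal heuristic fuel frontier' visited
      else
        let visited' := PySem.Set.add visited current
        let frontier'' := (pvGet graph current []).foldl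
          (fun q nb => q ++ [(cost + pvGet heuristic nb 0, path ++ [nb])]) frontier'
        pvLoopB graph goal heuristic fuel frontier'' visited'

def branch_and_bound_with_extended_list_heuristic_alt (graph : List (String × List String))
    (start : String) (goal : String) (heuristic : List (String × Int)) : Option (List String) :=
  pvLoopB graph goal heuristic (pvFuel graph) [(pvGet heuristic start 0, [start])] PySem.Set.empty

-- ===== PRECONDITION & SPEC =====
-- Python A evaluates heuristic[start], a KeyError when start is not a key of heuristic;
-- Pre_ admits exactly the inputs where that lookup (A's only possible exception) succeeds.
def Pre_branch_and_bound_with_extended_list_heuristic (graph : List (String × List String)) (start : String) (goal : String) (heuristic : List (String × Int)) : Prop :=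
  heuristic.any (fun p => p.1 == start) = true
instance (graph : List (String × List String)) (start : String) (goal : String) (heuristic : List (String × Int)) : Decidable (Pre_branch_and_bound_with_extended_list_heuristic graph start goal heuristic) := by unfold Pre_branch_and_bound_with_extended_list_heuristic; infer_instance

def pvWitness_branch_and_bound_with_extended_list_heuristic : (List (String × List String)) × String × String × (List (String × Int)) :=
  ([("a", ["b", "c"]), ("b", ["c"])], "a", "c", [("a", 3), ("b", 1), ("c", 0)])

def Spec_branch_and_bound_with_extended_list_heuristic (graph : List (String × List String)) (start : String) (goal : String) (heuristic : List (String × Int)) (out : Option (List String)) : Prop := out = branch_and_bound_with_extended_list_heuristic_alt graph start goal heuristic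
instance (graph : List (String × List String)) (start : String) (goal : String) (heuristic : List (String × Int)) (out : Option (List String)) : Decidable (Spec_branch_and_bound_with_extended_list_heuristic graph start goal heuristic out) := by unfold Spec_branch_and_bound_with_extended_list_heuristic; infer_instance

-- ===== CLAIM (what is proved, stated in full; the proofs are below) =====
def Claim_equal_branch_and_bound_with_extended_list_heuristic : Prop := ∀ (graph : List (String × List String)) (start : String) (goal : String) (heuristic : List (String × Int)), Dom_branch_and_bound_with_extended_list_heuristic graph start goal heuristic → Pre_branch_and_bound_with_extended_list_heuristic graph start goal heuristic → Spec_branch_and_bound_with_extended_list_heuristic graph start goal heuristic (branch_and_bound_with_extended_list_heuristic graph start goal heuristic)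

-- ===== LEMMAS AND PROOFS =====

-- ---- the strict order pvLt is a strict linear order ----
theorem pvLexLt_irrefl (l : List String) : pvLexLt l l = false := by
  induction l with
  | nil => rfl
  | cons a t ih => simp [pvLexLt, ih]

theorem pvLexLt_trans {a b c : List String} (h1 : pvLexLt a b = true)
    (h2 : pvLexLt b c = true) : pvLexLt a c = true := by
  induction a generalizing b c with
  | nil => cases b <;> cases c <;> simp_all [pvLexLt]
  | cons x xs ih =>
    cases b with
    | nil => simp [pvLexLt] at h1
    | cons y ys =>
      cases c with
      | nil => simp [pvLexLt] at h2
      | cons z zs =>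
        simp only [pvLexLt, Bool.or_eq_true, Bool.and_eq_true, decide_eq_true_eq, beq_iff_eq] at *
        rcases h1 with h1 | ⟨rfl, h1⟩ <;> rcases h2 with h2 | ⟨rfl, h2⟩
        · exact Or.inl (lt_trans h1 h2)
        · exact Or.inl h1
        · exact Or.inl h2
        · exact Or.inr ⟨rfl, ih h1 h2⟩

theorem pvLexLt_conn {a b : List String} (h1 : pvLexLt a b = false)
    (h2 : pvLexLt b a = false) : a = b := by
  induction a generalizing b with
  | nil => cases b <;> simp_all [pvLexLt]
  | cons x xs ih =>
    cases b with
    | nil => simp [pvLexLt] at h2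
    | cons y ys =>
      simp only [pvLexLt, Bool.or_eq_false_iff, Bool.and_eq_false_iff,
        decide_eq_false_iff_not, beq_eq_false_iff_ne, ne_eq, not_lt] at h1 h2
      obtain ⟨hxy, h1'⟩ := h1
      obtain ⟨hyx, h2'⟩ := h2
      have hxy' : x = y := le_antisymm hyx hxy
      subst hxy'
      rcases h1' with h | h1' ; · exact absurd rfl h
      rcases h2' with h | h2' ; · exact absurd rfl h
      exact congrArg _ (ih h1' h2')

theorem pvLt_irrefl (x : Int × List String) : pvLt x x = false := by
  simp [pvLt, pvLexLt_irrefl]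

theorem pvLt_trans {x y z : Int × List String} (h1 : pvLt x y = true)
    (h2 : pvLt y z = true) : pvLt x z = true := by
  simp only [pvLt, Bool.or_eq_true, Bool.and_eq_true, decide_eq_true_eq, beq_iff_eq] at *
  rcases h1 with h1 | ⟨e1, h1⟩ <;> rcases h2 with h2 | ⟨e2, h2⟩
  · exact Or.inl (lt_trans h1 h2)
  · exact Or.inl (e2 ▸ h1)
  · exact Or.inl (e1 ▸ h2)
  · exact Or.inr ⟨e1.trans e2, pvLexLt_trans h1 h2⟩

theorem pvLt_conn {x y : Int × List String} (h1 : pvLt x y = false)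
    (h2 : pvLt y x = false) : x = y := by
  simp only [pvLt, Bool.or_eq_false_iff, Bool.and_eq_false_iff,
    decide_eq_false_iff_not, beq_eq_false_iff_ne, ne_eq, not_lt] at h1 h2
  obtain ⟨hxy, h1'⟩ := h1
  obtain ⟨hyx, h2'⟩ := h2
  have e : x.1 = y.1 := le_antisymm hyx hxy
  rcases h1' with h | h1' ; · exact absurd e h
  rcases h2' with h | h2' ; · exact absurd e.symm h
  have : x.2 = y.2 := pvLexLt_conn h1' h2'
  exact Prod.ext e this

theorem pvLt_asymm {x y : Int × List String} (h : pvLt x y = true) : pvLt y x = false := by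
  by_contra hc
  have hyx : pvLt y x = true := by revert hc; cases pvLt y x <;> simp
  have := pvLt_trans h hyx
  rw [pvLt_irrefl] at this
  exact Bool.false_ne_true this

theorem pvLe_trans {x y z : Int × List String} (h1 : pvLt y x = false)
    (h2 : pvLt z y = false) : pvLt z x = false := by
  by_contra hc
  have hzx : pvLt z x = true := by revert hc; cases pvLt z x <;> simp
  rcases hxy : pvLt x y with _ | _
  · rcases hyx : pvLt y x with _ | _
    · have := pvLt_conn hxy hyx; subst this; rw [hzx] at h2; cases h2
    · rw [hyx] at h1; cases h1
  · have := pvLt_trans hzx hxy; rw [this] at h2; cases h2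

-- ---- generic list helpers ----
theorem pv_getD_set_self {α : Type} (l : List α) (i : Nat) (x d : α) (h : i < l.length) :
    (l.set i x).getD i d = x := by
  rw [List.getD_eq_getElem _ d (by simpa using h)]
  simp

theorem pv_getD_set_ne {α : Type} (l : List α) (i j : Nat) (x d : α) (h : i ≠ j) :
    (l.set i x).getD j d = l.getD j d := by
  simp [List.getD, List.getElem?_set_ne h]

theorem pv_getD_mem {α : Type} (l : List α) (i : Nat) (d : α) (h : i < l.length) :
    l.getD i d ∈ l := by
  rw [List.getD_eq_getElem l d h]
  exact List.getElem_mem h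

theorem pv_count_set {α : Type} [BEq α] [LawfulBEq α] (l : List α) (i : Nat) (x a d : α)
    (h : i < l.length) :
    (l.set i x).count a + (if l.getD i d == a then 1 else 0)
      = l.count a + (if x == a then 1 else 0) := by
  induction l generalizing i with
  | nil => simp at h
  | cons y t ih =>
    cases i with
    | zero =>
      simp only [List.set_cons_zero, List.count_cons, List.getD_cons_zero]
      split_ifs <;> omega
    | succ n =>
      simp only [List.set_cons_succ, List.count_cons, List.getD_cons_succ]
      have := ih n (by simpa using h)
      split_ifs at this ⊢ <;> omega

theorem pv_set_set_perm {α : Type} [BEq α] [LawfulBEq α] (l : List α) (i j : Nat) (x d : α)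
    (hi : i < l.length) (hj : j < l.length) (hij : i ≠ j) :
    ((l.set i (l.getD j d)).set j x).Perm (l.set i x) := by
  rw [List.perm_iff_count]
  intro a
  have h1 := pv_count_set (l.set i (l.getD j d)) j x a d (by simpa using hj)
  rw [pv_getD_set_ne l i j _ d hij] at h1
  have h2 := pv_count_set l i (l.getD j d) a d hi
  have h3 := pv_count_set l i x a d hi
  split_ifs at h1 h2 h3 <;> omega

-- ---- heap invariant ----
def PVHeap (l : List (Int × List String)) : Prop :=
  ∀ i, 0 < i → i < l.length → pvLt (l.getD i pvD0) (l.getD ((i - 1) / 2) pvD0) = false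

-- heap property off position pos (pos is the "hole")
def SDInvB (heap : List (Int × List String)) (pos : Nat) : Prop :=
  ∀ i, 0 < i → i < heap.length → i ≠ pos → (i - 1) / 2 ≠ pos →
    pvLt (heap.getD i pvD0) (heap.getD ((i - 1) / 2) pvD0) = false

-- the item being sifted is ≤ the children of the hole
def SDInvC (heap : List (Int × List String)) (pos : Nat) (item : Int × List String) : Prop :=
  ∀ j, 0 < j → j < heap.length → (j - 1) / 2 = pos →
    pvLt (heap.getD j pvD0) item = false

-- the hole's parent is ≤ the children of the hole
def SDInvD (heap : List (Int × List String)) (pos : Nat) : Prop :=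
  ∀ j, 0 < j → j < heap.length → (j - 1) / 2 = pos → 0 < pos →
    pvLt (heap.getD j pvD0) (heap.getD ((pos - 1) / 2) pvD0) = false

-- ---- siftdown ----
theorem siftdownLoop_perm :
    ∀ (pos : Nat) (heap : List (Int × List String)) (item : Int × List String),
      pos < heap.length →
      (pvSiftdownLoop heap 0 pos item).Perm (heap.set pos item) := by
  intro pos
  induction pos using Nat.strong_induction_on with
  | _ pos ih =>
    intro heap item hlen
    rw [pvSiftdownLoop]
    by_cases h0 : 0 < pos
    · rw [dif_pos h0]
      by_cases hlt : pvLt item (heap.getD ((pos - 1) / 2) pvD0) = true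
      · rw [if_pos hlt]
        have hpp : (pos - 1) / 2 < pos := by omega
        have := ih ((pos - 1) / 2) hpp (heap.set pos (heap.getD ((pos - 1) / 2) pvD0)) item
          (by simpa using lt_trans hpp hlen)
        exact this.trans (pv_set_set_perm heap pos ((pos - 1) / 2) item pvD0 hlen
          (lt_trans hpp hlen) (by omega))
      · rw [if_neg hlt]
    · rw [dif_neg h0]

theorem siftdownLoop_heap :
    ∀ (pos : Nat) (heap : List (Int × List String)) (item : Int × List String),
      pos < heap.length → SDInvB heap pos → SDInvC heap pos item → SDInvD heap pos →
      PVHeap (pvSiftdownLoop heap 0 pos item) := by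
  intro pos
  induction pos using Nat.strong_induction_on with
  | _ pos ih =>
    intro heap item hlen hB hC hD
    rw [pvSiftdownLoop]
    by_cases h0 : 0 < pos
    · rw [dif_pos h0]
      set parent := heap.getD ((pos - 1) / 2) pvD0 with hparent
      by_cases hlt : pvLt item parent = true
      · rw [if_pos hlt]
        set pp := (pos - 1) / 2 with hppdef
        have hpplt : pp < pos := by omega
        have hpplen : pp < heap.length := lt_trans hpplt hlen
        set heap' := heap.set pos parent with hheap'
        have hlen' : ∀ k, (heap'.getD k pvD0) = if k = pos then parent else heap.getD k pvD0 := by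
          intro k
          by_cases hk : k = pos
          · rw [if_pos hk, hk]
            exact pv_getD_set_self heap pos parent pvD0 hlen
          · rw [if_neg hk]
            exact pv_getD_set_ne heap pos k parent pvD0 (fun h => hk h.symm)
        apply ih pp hpplt heap' item (by rw [hheap', List.length_set]; exact hpplen)
        · -- SDInvB heap' pp
          intro i hi0 hilen hip hippp
          rw [List.length_set] at hilen
          by_cases hipos : i = pos
          · exact absurd (by omega : (i - 1) / 2 = pp) hippp
          by_cases hpar : (i - 1) / 2 = pos
          · rw [hlen' i, hlen' ((i - 1) / 2), if_neg hipos, if_pos hpar]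
            exact hD i hi0 hilen hpar h0
          · rw [hlen' i, hlen' ((i - 1) / 2), if_neg hipos, if_neg hpar]
            exact hB i hi0 hilen hipos hpar
        · -- SDInvC heap' pp item
          intro j hj0 hjlen hpar
          rw [List.length_set] at hjlen
          by_cases hjpos : j = pos
          · rw [hlen' j, if_pos hjpos]
            exact pvLt_asymm hlt
          · rw [hlen' j, if_neg hjpos]
            have hjB := hB j hj0 hjlen hjpos (by omega)
            have : (j - 1) / 2 = pp := hpar
            rw [this] at hjB
            exact pvLe_trans (pvLt_asymm hlt) hjB
        · -- SDInvD heap' pp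
          intro j hj0 hjlen hpar hpp0
          rw [List.length_set] at hjlen
          have hppp : (pp - 1) / 2 ≠ pos := by omega
          have hppB : pvLt (heap.getD pp pvD0) (heap.getD ((pp - 1) / 2) pvD0) = false :=
            hB pp hpp0 hpplen (by omega) (by omega)
          by_cases hjpos : j = pos
          · rw [hlen' j, hlen' ((pp - 1) / 2), if_pos hjpos, if_neg hppp]
            exact hppB
          · rw [hlen' j, hlen' ((pp - 1) / 2), if_neg hjpos, if_neg hppp]
            have hjB := hB j hj0 hjlen hjpos (by omega)
            rw [(hpar : (j - 1) / 2 = pp)] at hjB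
            exact pvLe_trans hppB hjB
      · -- exit: parent ≤ item
        rw [if_neg hlt]
        intro i hi0 hilen
        rw [List.length_set] at hilen
        by_cases hipos : i = pos
        · subst hipos
          rw [pv_getD_set_self heap i item pvD0 hilen,
            pv_getD_set_ne heap i ((i - 1) / 2) item pvD0 (by omega)]
          exact Bool.eq_false_iff.mpr (fun h => hlt h)
        · by_cases hpar : (i - 1) / 2 = pos
          · rw [pv_getD_set_ne heap pos i item pvD0 (fun h => hipos h.symm), hpar,
              pv_getD_set_self heap pos item pvD0 hlen]
            exact hC i hi0 hilen hpar
          · rw [pv_getD_set_ne heap pos i item pvD0 (fun h => hipos h.symm),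
              pv_getD_set_ne heap pos ((i - 1) / 2) item pvD0 (fun h => hpar h.symm)]
            exact hB i hi0 hilen hipos hpar
    · -- pos = 0
      rw [dif_neg h0]
      intro i hi0 hilen
      rw [List.length_set] at hilen
      have hipos : i ≠ pos := by omega
      by_cases hpar : (i - 1) / 2 = pos
      · rw [pv_getD_set_ne heap pos i item pvD0 (fun h => hipos h.symm), hpar,
          pv_getD_set_self heap pos item pvD0 hlen]
        exact hC i hi0 hilen hpar
      · rw [pv_getD_set_ne heap pos i item pvD0 (fun h => hipos h.symm),
          pv_getD_set_ne heap pos ((i - 1) / 2) item pvD0 (fun h => hpar h.symm)]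
        exact hB i hi0 hilen hipos hpar

-- ---- siftup ----
theorem siftupLoop_perm :
    ∀ (n pos : Nat) (heap : List (Int × List String)) (item : Int × List String),
      heap.length - pos ≤ n → pos < heap.length →
      (pvSiftupLoop heap 0 pos item).Perm (heap.set pos item) := by
  intro n
  induction n with
  | zero => intro pos heap item h1 h2; omega
  | succ n ih =>
    intro pos heap item hn hlen
    rw [pvSiftupLoop]
    by_cases hch : 2 * pos + 1 < heap.length
    · rw [dif_pos hch]
      by_cases hcond : (2 * pos + 1 + 1 < heap.length &&
          !pvLt (heap.getD (2 * pos + 1) pvD0) (heap.getD (2 * pos + 1 + 1) pvD0)) = true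
      · rw [if_pos hcond]
        simp only [Bool.and_eq_true, decide_eq_true_eq] at hcond
        have hlenr := hcond.1
        have := ih (2 * pos + 1 + 1) (heap.set pos (heap.getD (2 * pos + 1 + 1) pvD0)) item
          (by rw [List.length_set]; omega) (by rw [List.length_set]; omega)
        exact this.trans (pv_set_set_perm heap pos (2 * pos + 1 + 1) item pvD0 hlen (by omega) (by omega))
      · rw [if_neg hcond]
        have := ih (2 * pos + 1) (heap.set pos (heap.getD (2 * pos + 1) pvD0)) item
          (by rw [List.length_set]; omega) (by rw [List.length_set]; omega)
        exact this.trans (pv_set_set_perm heap pos (2 * pos + 1) item pvD0 hlen (by omega) (by omega))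
    · rw [dif_neg hch]
      unfold pvSiftdown
      rw [pv_getD_set_self heap pos item pvD0 hlen]
      have := siftdownLoop_perm pos (heap.set pos item) item (by rw [List.length_set]; exact hlen)
      rw [List.set_set] at this
      exact this

-- moving the hole one step down to the chosen child c preserves the two invariants
theorem siftup_step (heap : List (Int × List String)) (pos c : Nat)
    (hlen : pos < heap.length) (hclen : c < heap.length) (hposc : pos < c)
    (hparc : (c - 1) / 2 = pos)
    (hsib : ∀ s, 0 < s → s < heap.length → (s - 1) / 2 = pos → s ≠ c →
      pvLt (heap.getD s pvD0) (heap.getD c pvD0) = false)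
    (hB : SDInvB heap pos) (hD : SDInvD heap pos) :
    SDInvB (heap.set pos (heap.getD c pvD0)) c ∧ SDInvD (heap.set pos (heap.getD c pvD0)) c := by
  have hgd : ∀ k, (heap.set pos (heap.getD c pvD0)).getD k pvD0
      = if k = pos then heap.getD c pvD0 else heap.getD k pvD0 := by
    intro k
    by_cases hk : k = pos
    · rw [if_pos hk, hk]
      exact pv_getD_set_self heap pos _ pvD0 hlen
    · rw [if_neg hk]
      exact pv_getD_set_ne heap pos k _ pvD0 (fun h => hk h.symm)
  constructor
  · intro i hi0 hilen hic hipc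
    rw [List.length_set] at hilen
    by_cases hipos : i = pos
    · subst hipos
      rw [hgd i, hgd ((i - 1) / 2), if_pos rfl, if_neg (by omega)]
      exact hD c (by omega) hclen hparc hi0
    · by_cases hpar : (i - 1) / 2 = pos
      · rw [hgd i, hgd ((i - 1) / 2), if_neg hipos, hpar, if_pos rfl]
        exact hsib i hi0 hilen hpar hic
      · rw [hgd i, hgd ((i - 1) / 2), if_neg hipos, if_neg hpar]
        exact hB i hi0 hilen hipos hpar
  · intro j hj0 hjlen hparj hc0
    rw [List.length_set] at hjlen
    rw [hgd j, hgd ((c - 1) / 2), if_neg (by omega), hparc, if_pos rfl]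
    have := hB j hj0 hjlen (by omega) (by omega)
    rw [hparj] at this
    exact this

theorem siftupLoop_heap :
    ∀ (n pos : Nat) (heap : List (Int × List String)) (item : Int × List String),
      heap.length - pos ≤ n → pos < heap.length → SDInvB heap pos → SDInvD heap pos →
      PVHeap (pvSiftupLoop heap 0 pos item) := by
  intro n
  induction n with
  | zero => intro pos heap item h1 h2; omega
  | succ n ih =>
    intro pos heap item hn hlen hB hD
    rw [pvSiftupLoop]
    by_cases hch : 2 * pos + 1 < heap.length
    · rw [dif_pos hch]
      by_cases hcond : (2 * pos + 1 + 1 < heap.length &&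
          !pvLt (heap.getD (2 * pos + 1) pvD0) (heap.getD (2 * pos + 1 + 1) pvD0)) = true
      · rw [if_pos hcond]
        simp only [Bool.and_eq_true, Bool.not_eq_eq_eq_not, Bool.not_true, decide_eq_true_eq] at hcond
        obtain ⟨hlenr, hLR⟩ := hcond
        have hstep := siftup_step heap pos (2 * pos + 1 + 1) hlen (by omega) (by omega) (by omega)
          (fun s hs0 hs hp hsc => by
            have : s = 2 * pos + 1 := by omega
            rw [this]
            exact hLR) hB hD
        exact ih (2 * pos + 1 + 1) (heap.set pos (heap.getD (2 * pos + 1 + 1) pvD0)) item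
          (by rw [List.length_set]; omega) (by rw [List.length_set]; omega) hstep.1 hstep.2
      · rw [if_neg hcond]
        have hcond' : 2 * pos + 1 + 1 < heap.length →
            pvLt (heap.getD (2 * pos + 1) pvD0) (heap.getD (2 * pos + 1 + 1) pvD0) = true := by
          intro hr
          by_contra hx
          apply hcond
          simp only [Bool.and_eq_true, Bool.not_eq_eq_eq_not, Bool.not_true, decide_eq_true_eq]
          exact ⟨hr, Bool.eq_false_iff.mpr hx⟩
        have hstep := siftup_step heap pos (2 * pos + 1) hlen (by omega) (by omega) (by omega)
          (fun s hs0 hs hp hsc => by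
            have : s = 2 * pos + 1 + 1 := by omega
            subst this
            exact pvLt_asymm (hcond' hs)) hB hD
        exact ih (2 * pos + 1) (heap.set pos (heap.getD (2 * pos + 1) pvD0)) item
          (by rw [List.length_set]; omega) (by rw [List.length_set]; omega) hstep.1 hstep.2
    · rw [dif_neg hch]
      unfold pvSiftdown
      rw [pv_getD_set_self heap pos item pvD0 hlen]
      apply siftdownLoop_heap pos (heap.set pos item) item (by rw [List.length_set]; exact hlen)
      · intro i hi0 hilen hipos hpar
        rw [List.length_set] at hilen
        rw [pv_getD_set_ne heap pos i item pvD0 (fun h => hipos h.symm),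
          pv_getD_set_ne heap pos ((i - 1) / 2) item pvD0 (fun h => hpar h.symm)]
        exact hB i hi0 hilen hipos hpar
      · intro j hj0 hjlen hpar
        rw [List.length_set] at hjlen
        exact absurd hjlen (by omega)
      · intro j hj0 hjlen hpar h0p
        rw [List.length_set] at hjlen
        exact absurd hjlen (by omega)

-- ---- heappush ----
theorem pvHeappush_perm (heap : List (Int × List String)) (item : Int × List String) :
    (pvHeappush heap item).Perm (heap ++ [item]) := by
  unfold pvHeappush pvSiftdown
  have hlen : heap.length < (heap ++ [item]).length := by simp
  have hgd : (heap ++ [item]).getD heap.length pvD0 = item := by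
    rw [List.getD_eq_getElem _ _ hlen]
    simp
  rw [hgd]
  have hset : (heap ++ [item]).set heap.length item = heap ++ [item] := by
    have h1 : (heap ++ [item])[heap.length] = item := by
      rw [List.getElem_append_right (by omega)]
      simp
    calc (heap ++ [item]).set heap.length item
        = (heap ++ [item]).set heap.length ((heap ++ [item])[heap.length]) := by rw [h1]
      _ = heap ++ [item] := List.set_getElem_self hlen
  have := siftdownLoop_perm heap.length (heap ++ [item]) item hlen
  rwa [hset] at this

theorem pvHeappush_heap (heap : List (Int × List String)) (item : Int × List String)
    (hh : PVHeap heap) : PVHeap (pvHeappush heap item) := by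
  unfold pvHeappush pvSiftdown
  have hlen : heap.length < (heap ++ [item]).length := by simp
  have hgd : (heap ++ [item]).getD heap.length pvD0 = item := by
    rw [List.getD_eq_getElem _ _ hlen]
    simp
  rw [hgd]
  have hleft : ∀ k, k < heap.length → (heap ++ [item]).getD k pvD0 = heap.getD k pvD0 := by
    intro k hk
    simp [List.getD, List.getElem?_append_left hk]
  apply siftdownLoop_heap heap.length (heap ++ [item]) item hlen
  · intro i hi0 hilen hipos hpar
    simp only [List.length_append, List.length_cons, List.length_nil] at hilen
    have hi : i < heap.length := by omega
    rw [hleft i hi, hleft ((i - 1) / 2) (by omega)]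
    exact hh i hi0 hi
  · intro j hj0 hjlen hpar
    simp only [List.length_append, List.length_cons, List.length_nil] at hjlen
    omega
  · intro j hj0 hjlen hpar hp0
    simp only [List.length_append, List.length_cons, List.length_nil] at hjlen
    omega

-- ---- heappop ----
theorem pvHeappop_root (heap : List (Int × List String)) (hne : heap ≠ []) :
    (pvHeappop heap).1 = heap.getD 0 pvD0 := by
  unfold pvHeappop
  by_cases hr : heap.dropLast.isEmpty
  · rw [if_pos hr]
    have h1 : heap.length = 1 := by
      have := List.isEmpty_iff.mp hr
      have hl : heap.dropLast.length = heap.length - 1 := List.length_dropLast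
      rw [this] at hl
      simp only [List.length_nil] at hl
      have := List.length_pos_iff.mpr hne
      omega
    obtain ⟨x, hx⟩ := List.length_eq_one_iff.mp h1
    subst hx
    simp [List.getLast?]
  · rw [if_neg hr]
    have hr' : heap.dropLast ≠ [] := fun h => hr (by simp [h])
    have h0 : 0 < heap.dropLast.length := List.length_pos_iff.mpr hr'
    simp only []
    rw [List.getD_eq_getElem _ _ h0, List.getD_eq_getElem _ _ (by simp at h0 ⊢; omega),
      List.getElem_dropLast]

theorem pvHeappop_perm (heap : List (Int × List String)) (hne : heap ≠ []) :
    ((pvHeappop heap).1 :: (pvHeappop heap).2).Perm heap := by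
  have hsplit : heap.dropLast ++ [heap.getLast hne] = heap := List.dropLast_concat_getLast hne
  have hlast : heap.getLast?.getD pvD0 = heap.getLast hne := by
    rw [List.getLast?_eq_some_getLast hne]
    rfl
  unfold pvHeappop
  by_cases hr : heap.dropLast.isEmpty
  · rw [if_pos hr]
    have he : heap.dropLast = [] := List.isEmpty_iff.mp hr
    simp only [hlast]
    have hfin : [heap.getLast hne].Perm (heap.dropLast ++ [heap.getLast hne]) := by
      rw [he]
      simp
    rw [hsplit] at hfin
    exact hfin
  · rw [if_neg hr]
    have hr' : heap.dropLast ≠ [] := fun h => hr (by simp [h])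
    have h0 : 0 < heap.dropLast.length := List.length_pos_iff.mpr hr'
    simp only [hlast]
    have hperm1 := siftupLoop_perm (heap.dropLast.set 0 (heap.getLast hne)).length 0
      (heap.dropLast.set 0 (heap.getLast hne)) (heap.getLast hne)
      (by omega) (by rw [List.length_set]; exact h0)
    rw [List.set_set] at hperm1
    unfold pvSiftup
    rw [pv_getD_set_self heap.dropLast 0 (heap.getLast hne) pvD0 h0]
    -- (rest[0] :: rest.set 0 last).Perm (rest ++ [last]) = heap
    have hfin : (heap.dropLast.getD 0 pvD0 :: heap.dropLast.set 0 (heap.getLast hne)).Perm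
        (heap.dropLast ++ [heap.getLast hne]) := by
      rw [List.perm_iff_count]
      intro a
      have hcs := pv_count_set heap.dropLast 0 (heap.getLast hne) a pvD0 h0
      simp only [List.count_cons, List.count_append, List.count_nil]
      split_ifs at hcs ⊢ <;> omega
    have := List.Perm.trans (List.Perm.cons _ hperm1) hfin
    rw [hsplit] at this
    exact this

theorem pvHeappop_heap (heap : List (Int × List String)) (hh : PVHeap heap) :
    PVHeap (pvHeappop heap).2 := by
  unfold pvHeappop
  by_cases hr : heap.dropLast.isEmpty
  · rw [if_pos hr]
    intro i hi0 hilen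
    simp at hilen
  · rw [if_neg hr]
    have hr' : heap.dropLast ≠ [] := fun h => hr (by simp [h])
    have h0 : 0 < heap.dropLast.length := List.length_pos_iff.mpr hr'
    have hdl : heap.dropLast.length = heap.length - 1 := List.length_dropLast
    simp only []
    unfold pvSiftup
    rw [pv_getD_set_self heap.dropLast 0 _ pvD0 h0]
    apply siftupLoop_heap (heap.dropLast.set 0 (heap.getLast?.getD pvD0)).length 0 _ _ (by omega)
      (by rw [List.length_set]; exact h0)
    · intro i hi0 hilen hipos hpar
      rw [List.length_set] at hilen
      rw [pv_getD_set_ne heap.dropLast 0 i _ pvD0 (fun h => hipos h.symm),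
        pv_getD_set_ne heap.dropLast 0 ((i - 1) / 2) _ pvD0 (fun h => hpar h.symm)]
      have hgi : heap.dropLast.getD i pvD0 = heap.getD i pvD0 := by
        rw [List.getD_eq_getElem _ _ hilen, List.getD_eq_getElem _ _ (by omega),
          List.getElem_dropLast]
      have hgp : heap.dropLast.getD ((i - 1) / 2) pvD0 = heap.getD ((i - 1) / 2) pvD0 := by
        rw [List.getD_eq_getElem _ _ (by omega), List.getD_eq_getElem _ _ (by omega),
          List.getElem_dropLast]
      rw [hgi, hgp]
      exact hh i hi0 (by omega)
    · intro j hj0 hjlen hpar hp0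
      omega

-- the root of a heap is ≤ every element
theorem pvHeap_root_min (heap : List (Int × List String)) (hh : PVHeap heap) :
    ∀ x ∈ heap, pvLt x (heap.getD 0 pvD0) = false := by
  have haux : ∀ i, i < heap.length → pvLt (heap.getD i pvD0) (heap.getD 0 pvD0) = false := by
    intro i
    induction i using Nat.strong_induction_on with
    | _ i ih =>
      intro hilen
      by_cases hi0 : 0 < i
      · exact pvLe_trans (ih ((i - 1) / 2) (by omega) (by omega)) (hh i hi0 hilen)
      · have : i = 0 := by omega
        rw [this]
        exact pvLt_irrefl _
  intro x hx
  obtain ⟨i, hi, hieq⟩ := List.mem_iff_getElem.mp hx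
  have := haux i hi
  rw [List.getD_eq_getElem _ _ hi, hieq] at this
  exact this

-- ---- min over a list (Python min) ----
theorem pvMin_spec (x : Int × List String) (t : List (Int × List String)) :
    pvMin (x :: t) ∈ x :: t ∧ ∀ y ∈ x :: t, pvLt y (pvMin (x :: t)) = false := by
  induction t generalizing x with
  | nil =>
    constructor
    · simp [pvMin]
    · intro y hy
      simp at hy
      subst hy
      exact pvLt_irrefl _
  | cons h t' ih =>
    have hstep : pvMin (x :: h :: t') = pvMin ((if pvLt h x then h else x) :: t') := by
      simp only [pvMin, List.foldl_cons]
    obtain ⟨ihmem, ihmin⟩ := ih (if pvLt h x then h else x)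
    rw [hstep]
    constructor
    · rcases List.mem_cons.mp ihmem with hm | hm
      · rw [hm]
        split_ifs <;> simp
      · simp [hm]
    · intro y hy
      by_cases hlt : pvLt h x = true
      · rw [if_pos hlt] at ihmin ⊢
        rcases List.mem_cons.mp hy with rfl | hy'
        · exact pvLe_trans (ihmin h List.mem_cons_self) (pvLt_asymm hlt)
        · rcases List.mem_cons.mp hy' with rfl | hy''
          · exact ihmin y List.mem_cons_self
          · exact ihmin y (List.mem_cons_of_mem _ hy'')
      · rw [if_neg hlt] at ihmin ⊢
        rcases List.mem_cons.mp hy with rfl | hy'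
        · exact ihmin y List.mem_cons_self
        · rcases List.mem_cons.mp hy' with rfl | hy''
          · exact pvLe_trans (ihmin x List.mem_cons_self) (Bool.eq_false_iff.mpr hlt)
          · exact ihmin y (List.mem_cons_of_mem _ hy'')

-- Python list.remove of a present element is List.erase
theorem pv_idxOf_eq {α : Type} [BEq α] [LawfulBEq α] (l : List α) (x : α) (hx : x ∈ l) :
    l.idxOf? x = some (l.idxOf x) := by
  induction l with
  | nil => cases hx
  | cons a t ih =>
    by_cases hax : a = x
    · subst hax
      simp [List.idxOf?_cons, List.idxOf_cons_self]
    · have hxt : x ∈ t := by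
        rcases List.mem_cons.mp hx with h | h
        · exact absurd h.symm hax
        · exact h
      simp [List.idxOf?_cons, List.idxOf_cons, beq_false_of_ne hax, ih hxt]

-- Python list.remove of a present element is List.erase
theorem pv_remove_getD (l : List (Int × List String)) (x : Int × List String) (hx : x ∈ l) :
    (PySem.List.remove? l x).getD l = l.erase x := by
  unfold PySem.List.remove?
  rw [pv_idxOf_eq l x hx]
  simp only [Option.map_some, Option.getD_some]
  exact List.eraseIdx_idxOf_eq_erase x l

-- pushing a batch of entries: heappush on the A side, append on the B side
theorem pv_foldl_push (ns : List String) (f : String → Int × List String) :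
    ∀ (q fr : List (Int × List String)), PVHeap q → q.Perm fr →
      PVHeap (ns.foldl (fun q nb => pvHeappush q (f nb)) q) ∧
      (ns.foldl (fun q nb => pvHeappush q (f nb)) q).Perm
        (ns.foldl (fun q nb => q ++ [f nb]) fr) := by
  induction ns with
  | nil => intro q fr hh hp; exact ⟨hh, hp⟩
  | cons n t ih =>
    intro q fr hh hp
    simp only [List.foldl_cons]
    exact ih (pvHeappush q (f n)) (fr ++ [f n]) (pvHeappush_heap q (f n) hh)
      ((pvHeappush_perm q (f n)).trans (hp.append_right [f n]))

-- ---- the two search loops agree ----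
theorem pv_loops_eq (graph : List (String × List String)) (goal : String)
    (heuristic : List (String × Int)) :
    ∀ (fuel : Nat) (pq fr : List (Int × List String)) (visited : PySem.Set String),
      PVHeap pq → pq.Perm fr →
      pvLoopA graph goal heuristic fuel pq visited = pvLoopB graph goal heuristic fuel fr visited := by
  intro fuel
  induction fuel with
  | zero => intro pq fr visited hh hp; rfl
  | succ fuel ih =>
    intro pq fr visited hh hp
    cases hpq : pq with
    | nil =>
      subst hpq
      have : fr = [] := hp.symm.eq_nil
      subst this
      rfl
    | cons p0 pt =>
      subst hpq
      have hfrne : fr ≠ [] := by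
        intro h
        subst h
        exact absurd hp.eq_nil (by simp)
      obtain ⟨f0, ft, rfl⟩ : ∃ f0 ft, fr = f0 :: ft := by
        cases fr with
        | nil => exact absurd rfl hfrne
        | cons a b => exact ⟨a, b, rfl⟩
      -- the popped heap minimum equals min(frontier)
      have hne : (p0 :: pt : List (Int × List String)) ≠ [] := by simp
      have hroot := pvHeappop_root (p0 :: pt) hne
      have hpperm := pvHeappop_perm (p0 :: pt) hne
      have hpheap := pvHeappop_heap (p0 :: pt) hh
      obtain ⟨hmmem, hmmin⟩ := pvMin_spec f0 ft
      have hmeq : (pvHeappop (p0 :: pt)).1 = pvMin (f0 :: ft) := by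
        apply pvLt_conn
        · -- heap root not < frontier min: frontier min is minimal and root ∈ frontier
          apply hmmin
          rw [← hp.mem_iff]
          rw [hroot]
          exact pv_getD_mem _ 0 pvD0 (by simp)
        · -- frontier min not < heap root: root is minimal and min ∈ heap
          rw [hroot]
          apply pvHeap_root_min _ hh
          rw [hp.mem_iff]
          exact hmmem
      have herase : (PySem.List.remove? (f0 :: ft) (pvMin (f0 :: ft))).getD (f0 :: ft)
          = (f0 :: ft).erase (pvMin (f0 :: ft)) := pv_remove_getD _ _ hmmem
      have hperm' : (pvHeappop (p0 :: pt)).2.Perm ((f0 :: ft).erase (pvMin (f0 :: ft))) := by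
        have h1 : ((pvHeappop (p0 :: pt)).1 :: (pvHeappop (p0 :: pt)).2).Perm
            (pvMin (f0 :: ft) :: (f0 :: ft).erase (pvMin (f0 :: ft))) :=
          hpperm.trans (hp.trans (List.perm_cons_erase hmmem))
        rw [hmeq] at h1
        exact h1.cons_inv
      -- unfold one iteration of each loop
      show (let popped := pvHeappop (p0 :: pt);
        let cost := popped.1.1;
        let path := popped.1.2;
        let pq' := popped.2;
        let current := PySem.List.pyGetD path (-1) "";
        if current == goal then some path
        else if PySem.Set.contains visited current then pvLoopA graph goal heuristic fuel pq' visited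
        else
          let visited' := PySem.Set.add visited current;
          let pq'' := (pvGet graph current []).foldl
            (fun q nb => pvHeappush q (cost + pvGet heuristic nb 0, path ++ [nb])) pq';
          pvLoopA graph goal heuristic fuel pq'' visited') = _
      show _ = (let best := pvMin (f0 :: ft);
        let frontier' := (PySem.List.remove? (f0 :: ft) best).getD (f0 :: ft);
        let cost := best.1;
        let path := best.2;
        let current := PySem.List.pyGetD path (-1) "";
        if current == goal then some path
        else if PySem.Set.contains visited current then pvLoopB graph goal heuristic fuel frontier' visited
        else
          let visited' := PySem.Set.add visited current;
          let frontier'' := (pvGet graph current []).foldl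
            (fun q nb => q ++ [(cost + pvGet heuristic nb 0, path ++ [nb])]) frontier';
          pvLoopB graph goal heuristic fuel frontier'' visited')
      simp only [hmeq, herase]
      by_cases hgoal : (PySem.List.pyGetD (pvMin (f0 :: ft)).2 (-1) "" == goal) = true
      · simp only [hgoal, if_pos]
      · simp only [hgoal, if_neg, Bool.false_eq_true, not_false_iff]
        by_cases hvis : PySem.Set.contains visited (PySem.List.pyGetD (pvMin (f0 :: ft)).2 (-1) "") = true
        · simp only [hvis, if_pos]
          exact ih _ _ visited hpheap hperm'
        · simp only [hvis, if_neg, Bool.false_eq_true, not_false_iff]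
          obtain ⟨hh'', hp''⟩ := pv_foldl_push
            (pvGet graph (PySem.List.pyGetD (pvMin (f0 :: ft)).2 (-1) "") [])
            (fun nb => ((pvMin (f0 :: ft)).1 + pvGet heuristic nb 0, (pvMin (f0 :: ft)).2 ++ [nb]))
            _ _ hpheap hperm'
          exact ih _ _ _ hh'' hp''

-- ===== VERDICT (by name: the statement is the Claim_ definition above) =====
theorem branch_and_bound_with_extended_list_heuristic_spec : Claim_equal_branch_and_bound_with_extended_list_heuristic := by
  intro graph start goal heuristic _hdom _hpre
  unfold Spec_branch_and_bound_with_extended_list_heuristic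
  unfold branch_and_bound_with_extended_list_heuristic branch_and_bound_with_extended_list_heuristic_alt
  exact pv_loops_eq graph goal heuristic (pvFuel graph) _ _ _
    (fun i h1 h2 => by simp at h2; omega) (List.Perm.refl _)
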